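-- pv_equiv track=rewrite | github.com/shraga89/ExplainDaV | Code/utils.py | get_recreation_operations
-- ===== SOURCE A (Python) =====
-- def get_recreation_operations(sols):
--     op_set = set()
--     for sol in sols:
--         if 'DUPLICATED' in sols[sol]:
--             op_set.add('REMOVE_DUPLICATED')
--         if 'CONTAIN/S_NAN' in sols[sol]:
--             op_set.add('DROP_NA')
--         if len(op_set) == 2:
--             return op_set
--     return op_set
-- ===== SOURCE B (Python) =====
-- # Two independent any() scans over the values, one per marker, instead of a fused loop.
-- def get_recreation_operations(sols):
--     op_set = set()
--     if any('DUPLICATED' in v for v in sols.values()):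
--         op_set.add('REMOVE_DUPLICATED')
--     if any('CONTAIN/S_NAN' in v for v in sols.values()):
--         op_set.add('DROP_NA')
--     return op_set
-- ===== Notes on version B (the rewrite author's own statement) =====
-- stated objective: simpler
-- what changed: A runs one fused loop over the dict keys with per-key lookups, two membership checks per value, a running set and an early return at size 2; B makes two independent any() scans over the values, one per marker, and adds each operation once. Pre_ excludes association lists with duplicate keys, which do not represent any Python dict.
import Mathlib
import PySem

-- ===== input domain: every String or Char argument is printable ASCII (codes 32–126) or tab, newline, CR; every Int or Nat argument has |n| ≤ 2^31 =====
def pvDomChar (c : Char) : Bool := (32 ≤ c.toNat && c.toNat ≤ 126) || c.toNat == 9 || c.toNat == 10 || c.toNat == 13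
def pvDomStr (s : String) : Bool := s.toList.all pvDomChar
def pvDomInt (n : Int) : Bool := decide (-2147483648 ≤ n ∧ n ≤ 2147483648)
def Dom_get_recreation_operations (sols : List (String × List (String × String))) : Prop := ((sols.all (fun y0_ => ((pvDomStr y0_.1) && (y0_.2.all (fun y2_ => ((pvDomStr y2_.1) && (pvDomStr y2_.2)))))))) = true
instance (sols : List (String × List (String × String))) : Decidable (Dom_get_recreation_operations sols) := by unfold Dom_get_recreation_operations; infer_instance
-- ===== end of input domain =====

-- B replaces A's fused loop (per-key lookup, two checks per value, early return at set size 2)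
-- by two independent any() scans over the values; objective: simpler decomposition.

-- ===== PORT A =====
-- 'DUPLICATED' in sols[sol] : membership test against the inner dict's keys
def pvHasDup (v : List (String × String)) : Bool :=
  PySem.Dict.contains (PySem.Dict.mk v) "DUPLICATED"
def pvHasNan (v : List (String × String)) : Bool :=
  PySem.Dict.contains (PySem.Dict.mk v) "CONTAIN/S_NAN"

-- op_set is a Python SET over the two-element universe {'REMOVE_DUPLICATED','DROP_NA'};
-- a Python set has no observable order, so the port carries it as its two membership
-- flags (d, n) — len(op_set) = number of true flags — and materializes the set on return.
def pvOpSet (d n : Bool) : List String :=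
  (if d then ["REMOVE_DUPLICATED"] else []) ++ (if n then ["DROP_NA"] else [])

-- the for-loop: iterate the dict's keys in order, look each key up in sols,
-- add to op_set per check, early return once len(op_set) == 2
def pvGoA (sols : List (String × List (String × String))) :
    List (String × List (String × String)) → Bool → Bool → List String
  | [], d, n => pvOpSet d n
  | (k, _) :: rest, d, n =>
      let v := PySem.Dict.getD (PySem.Dict.mk sols) k []
      let d1 := d || pvHasDup v
      let n1 := n || pvHasNan v
      if d1 && n1 then pvOpSet d1 n1 else pvGoA sols rest d1 n1

def get_recreation_operations (sols : List (String × List (String × String))) : List String :=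
  pvGoA sols sols false false

-- ===== PORT B =====
def get_recreation_operations_alt (sols : List (String × List (String × String))) : List String :=
  let op0 : PySem.Set String := PySem.Set.empty
  let op1 := if ((PySem.Dict.mk sols).values.any pvHasDup) then PySem.Set.add op0 "REMOVE_DUPLICATED" else op0
  let op2 := if ((PySem.Dict.mk sols).values.any pvHasNan) then PySem.Set.add op1 "DROP_NA" else op1
  op2

-- ===== PRECONDITION & SPEC =====
-- Pre_ excludes association lists with duplicate keys: Python dict keys are unique, so
-- such a list does not represent any Python dict and A is never called on it.
def Pre_get_recreation_operations (sols : List (String × List (String × String))) : Prop :=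
  (sols.map Prod.fst).Nodup
instance (sols : List (String × List (String × String))) : Decidable (Pre_get_recreation_operations sols) := by unfold Pre_get_recreation_operations; infer_instance

def pvWitness_get_recreation_operations : (List (String × List (String × String))) :=
  [("t1", [("DUPLICATED", "d")]), ("t2", [("CONTAIN/S_NAN", "n")])]

def Spec_get_recreation_operations (sols : List (String × List (String × String))) (out : List String) : Prop := out = get_recreation_operations_alt sols
instance (sols : List (String × List (String × String))) (out : List String) : Decidable (Spec_get_recreation_operations sols out) := by unfold Spec_get_recreation_operations; infer_instance

-- ===== CLAIM (what is proved, stated in full; the proofs are below) =====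
def Claim_equal_get_recreation_operations : Prop := ∀ (sols : List (String × List (String × String))), Dom_get_recreation_operations sols → Pre_get_recreation_operations sols → Spec_get_recreation_operations sols (get_recreation_operations sols)

-- ===== LEMMAS AND PROOFS =====

-- A's loop with each pair's own value (equal to pvGoA when the keys are Nodup)
def pvGoA' : List (String × List (String × String)) → Bool → Bool → List String
  | [], d, n => pvOpSet d n
  | (_, v) :: rest, d, n =>
      let d1 := d || pvHasDup v
      let n1 := n || pvHasNan v
      if d1 && n1 then pvOpSet d1 n1 else pvGoA' rest d1 n1

theorem pvGoA_eq_goA' (sols : List (String × List (String × String)))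
    (hnd : (sols.map Prod.fst).Nodup) :
    ∀ (l pre : List (String × List (String × String))), sols = pre ++ l →
      ∀ d n, pvGoA sols l d n = pvGoA' l d n := by
  intro l
  induction l with
  | nil => intro pre h d n; rfl
  | cons hd tl ih =>
    intro pre h d n
    obtain ⟨k, v⟩ := hd
    have hm : (k, v) ∈ (PySem.Dict.mk sols).items := by
      show (k, v) ∈ sols
      rw [h]
      exact List.mem_append_right _ (List.mem_cons_self ..)
    have hv : PySem.Dict.getD (PySem.Dict.mk sols) k [] = v :=
      PySem.Dict.getD_of_mem_items _ hm hnd _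
    simp only [pvGoA, pvGoA', hv]
    split_ifs
    · rfl
    · exact ih (pre ++ [(k, v)]) (by simpa using h) _ _

-- the loop computes the two flags' disjunction over the remaining values
theorem pvGoA'_flags : ∀ (l : List (String × List (String × String))) (d n : Bool),
    pvGoA' l d n =
      pvOpSet (d || l.any fun kv => pvHasDup kv.2) (n || l.any fun kv => pvHasNan kv.2) := by
  intro l
  induction l with
  | nil => intro d n; simp [pvGoA']
  | cons hd tl ih =>
    intro d n
    obtain ⟨k, v⟩ := hd
    simp only [pvGoA', List.any_cons]
    split_ifs with h
    · obtain ⟨hd1, hn1⟩ := Bool.and_eq_true_iff.mp h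
      rw [← Bool.or_assoc, ← Bool.or_assoc, hd1, hn1]
      simp
    · rw [ih]
      simp [Bool.or_assoc]

theorem pv_values_mk (sols : List (String × List (String × String))) :
    (PySem.Dict.mk sols).values = sols.map Prod.snd := rfl

theorem pvAlt_eq_opSet (sols : List (String × List (String × String))) :
    get_recreation_operations_alt sols =
      pvOpSet (sols.any fun kv => pvHasDup kv.2) (sols.any fun kv => pvHasNan kv.2) := by
  unfold get_recreation_operations_alt
  rw [pv_values_mk, List.any_map, List.any_map]
  cases hd : (sols.any fun kv => pvHasDup kv.2) <;>
    cases hn : (sols.any fun kv => pvHasNan kv.2) <;>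
      simp only [Function.comp_def] at * <;>
        simp [hd, hn, pvOpSet, PySem.Set.empty, PySem.Set.add, PySem.Set.contains]

-- ===== VERDICT (by name: the statement is the Claim_ definition above) =====
theorem get_recreation_operations_spec : Claim_equal_get_recreation_operations := by
  intro sols _ hpre
  unfold Spec_get_recreation_operations
  rw [pvAlt_eq_opSet]
  show pvGoA sols sols false false = _
  rw [pvGoA_eq_goA' sols hpre sols [] rfl, pvGoA'_flags]
  simp
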